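-- pv_equiv track=rewrite | github.com/abuhabuh/digital-self | rag/src/indexer.py | _get_heading_level
-- ===== SOURCE A (Python) =====
-- def _get_heading_level(line: str) -> int:
--     """Get the heading level of a markdown line."""
--     if not line.startswith('#'):
--         return 0
--
--     # Count the number of # at the beginning of the line
--     level = 0
--     for char in line:
--         if char == '#':
--             level += 1
--         else:
--             break
--
--     # Verify it's a proper heading with space after #
--     if level > 0 and len(line) > level and line[level] == ' ':
--         return level
--     return 0
-- ===== SOURCE B (Python) =====
-- import re
--
-- _HEADING_RE = re.compile(r'(#+) ')
--
-- def _get_heading_level(line: str) -> int: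
--     m = _HEADING_RE.match(line)
--     return len(m.group(1)) if m else 0
-- ===== Notes on version B (the rewrite author's own statement) =====
-- stated objective: idiomatic
-- what changed: Replaced the manual startswith check, counting loop with break, and separate index/space validation by a single anchored regular expression r'(#+) ' whose first group length is the heading level.
import Mathlib
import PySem

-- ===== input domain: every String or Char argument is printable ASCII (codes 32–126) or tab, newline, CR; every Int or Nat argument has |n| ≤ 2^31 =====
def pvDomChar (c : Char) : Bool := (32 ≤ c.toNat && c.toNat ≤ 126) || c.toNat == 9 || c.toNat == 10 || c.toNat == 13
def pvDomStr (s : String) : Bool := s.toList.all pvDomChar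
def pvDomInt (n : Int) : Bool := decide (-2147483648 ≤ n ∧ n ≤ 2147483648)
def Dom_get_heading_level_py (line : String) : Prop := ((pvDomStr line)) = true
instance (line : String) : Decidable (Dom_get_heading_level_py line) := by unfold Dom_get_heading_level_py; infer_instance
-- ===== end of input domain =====

-- B replaces A's manual count-loop-with-break plus separate space check by one anchored
-- regex r'(#+) ' (idiomatic); return value only, no side effects involved.

-- ===== PORT A =====
-- the 'for char in line: … break' counting loop
def pvALoop : List Char → Int → Int
  | [], level => level
  | c :: rest, level => if c == '#' then pvALoop rest (level + 1) else level

def get_heading_level_py (line : String) : Int :=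
  if !(PySem.Str.startswith line "#") then 0
  else
    let level := pvALoop line.toList 0
    if level > 0 && decide (((PySem.Str.len line : Int)) > level)
         && (PySem.Str.pyGet? line level == some ' ') then level
    else 0

-- ===== PORT B =====
-- port of re.match(r'(#+) ', line): the (greedy, anchored) group is the maximal leading
-- run of '#' (one or more), and the next character must be a literal space.
def get_heading_level_py_alt (line : String) : Int :=
  let hs := line.toList.takeWhile (fun c => c == '#')
  if hs.length > 0 && ((line.toList.drop hs.length).head? == some ' ') then
    (hs.length : Int)
  else 0

-- ===== PRECONDITION & SPEC =====
def Spec_get_heading_level_py (line : String) (out : Int) : Prop := out = get_heading_level_py_alt line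
instance (line : String) (out : Int) : Decidable (Spec_get_heading_level_py line out) := by unfold Spec_get_heading_level_py; infer_instance

-- ===== CLAIM (what is proved, stated in full; the proofs are below) =====
def Claim_equal_get_heading_level_py : Prop := ∀ (line : String), Dom_get_heading_level_py line → Spec_get_heading_level_py line (get_heading_level_py line)

-- ===== LEMMAS AND PROOFS =====
theorem pvALoop_eq (l : List Char) (n : Int) :
    pvALoop l n = n + ((l.takeWhile (fun c => c == '#')).length : Int) := by
  induction l generalizing n with
  | nil => simp [pvALoop]
  | cons c rest ih =>
    by_cases h : c == '#'
    · simp [pvALoop, h, ih]; ring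
    · simp [pvALoop, h]


-- ===== VERDICT (by name: the statement is the Claim_ definition above) =====
theorem get_heading_level_py_spec : Claim_equal_get_heading_level_py := by
  intro line _
  unfold Spec_get_heading_level_py get_heading_level_py get_heading_level_py_alt
  rw [pvALoop_eq]
  rcases hl : line.toList with _ | ⟨c, rest⟩
  · simp [PySem.Str.startswith, PySem.Chars.startswith, hl]
  · by_cases hc : c = '#'
    · have hsw : PySem.Str.startswith line "#" = true := by
        rw [PySem.Str.startswith_eq, PySem.Chars.startswith_iff, hl, hc]
        exact ⟨rest, rfl⟩
      set k := ((c :: rest).takeWhile (fun c => c == '#')).length with hk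
      have hkpos : 0 < k := by
        simp [hk, hc]
      have hgets : PySem.Str.pyGet? line ((k : Int)) = (c :: rest)[k]? := by
        simp [hl]
      simp only [hsw, hgets, PySem.Str.len_eq, hl, Bool.not_true,
        Bool.false_eq_true, if_false, zero_add]
      rw [← hk]
      have hhead : ((c :: rest).drop k).head? = (c :: rest)[k]? := by
        rw [List.head?_drop]
      by_cases hsp : (c :: rest)[k]? = some ' '
      · have hklt : k < (c :: rest).length := by
          by_contra h
          rw [List.getElem?_eq_none (by omega)] at hsp
          simp at hsp
        have hklt' : k < rest.length + 1 := by simpa using hklt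
        simp [hsp, hhead, hkpos]
        omega
      · simp only [hhead]
        have : ((c :: rest)[k]? == some ' ') = false := by
          simp [hsp]
        simp [this, hkpos]
    · have hsw : PySem.Str.startswith line "#" = false := by
        rw [PySem.Str.startswith_eq]
        rw [show ("#".toList) = ['#'] from rfl]
        apply Bool.eq_false_iff.mpr
        intro h
        rw [PySem.Chars.startswith_iff, hl] at h
        rcases h with ⟨t, ht⟩
        simp at ht
        exact hc ht.1.symm
      simp [hl, hc]
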